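-- pv_equiv track=rewrite | github.com/HenriqueBBrum/Pre-filtering-Simulator | src/pre_filtering_simulation/header_matching.py | __compare_ports
-- ===== SOURCE A (Python) =====
-- def __compare_ports(pkt_port, rule_ports):
--     valid_port = False
--     if pkt_port in rule_ports[0]:
--         return rule_ports[0][pkt_port]
--
--     for port_range in rule_ports[1]:
--         if port_range[1] and pkt_port in port_range[0]:
--             valid_port = True
--         elif not port_range[1] and pkt_port in port_range[0]:
--             return False
--
--     if valid_port:
--         return True
--
--     # If the pkt_port didn't match any port entry in the rule, there are two options:
--     # If the rule says to match any port with the exception of the port defined (i.e. pkt_port=15, rule_port=[!15]), the pkt_port is valid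
--     # Else, the pkt_port should've matched a port to match this rule, but it did not, meaning the port is not valid
--     return not rule_ports[2]
-- ===== SOURCE B (Python) =====
-- def __compare_ports(pkt_port, rule_ports):
--     if pkt_port in rule_ports[0]:
--         return rule_ports[0][pkt_port]
--     ranges = rule_ports[1]
--     if any(not flag and pkt_port in r for r, flag in ranges):
--         return False
--     if any(flag and pkt_port in r for r, flag in ranges):
--         return True
--     return not rule_ports[2]
-- ===== Notes on version B (the rewrite author's own statement) =====
-- stated objective: simpler
-- what changed: Replaces the single mixed-pass loop with a valid_port accumulator and mid-loop early return by two independent accumulator-free any() existence scans (negative ranges first, then positive), followed by the default.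
import Mathlib
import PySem

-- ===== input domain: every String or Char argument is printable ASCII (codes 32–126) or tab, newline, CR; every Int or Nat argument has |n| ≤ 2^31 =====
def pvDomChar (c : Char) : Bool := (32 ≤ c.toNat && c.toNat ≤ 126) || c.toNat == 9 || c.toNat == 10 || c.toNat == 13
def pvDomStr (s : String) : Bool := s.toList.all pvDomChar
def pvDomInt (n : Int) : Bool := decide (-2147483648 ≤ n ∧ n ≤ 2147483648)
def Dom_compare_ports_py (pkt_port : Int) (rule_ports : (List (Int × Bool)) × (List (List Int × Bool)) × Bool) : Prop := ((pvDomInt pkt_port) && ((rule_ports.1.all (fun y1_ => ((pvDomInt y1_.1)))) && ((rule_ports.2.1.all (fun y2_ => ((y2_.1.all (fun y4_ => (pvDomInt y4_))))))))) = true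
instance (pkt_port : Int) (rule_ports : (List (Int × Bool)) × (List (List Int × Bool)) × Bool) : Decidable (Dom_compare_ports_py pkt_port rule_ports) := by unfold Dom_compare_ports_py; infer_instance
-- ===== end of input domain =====

-- B replaces A's single mixed-pass loop with valid_port accumulator and early return by two independent existence scans (negative ranges first, then positive); same cost, simpler.


-- ===== PORT A =====
-- dict lookup: first match in the association list (Python dict keys are unique; first match is exact)
def pvLookup (k : Int) : List (Int × Bool) → Option Bool
  | [] => none
  | (k', v) :: rest => if k' == k then some v else pvLookup k rest

-- loop of A: valid_port accumulator, early return False on a negative match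
def pvLoopA (pkt_port : Int) : List (List Int × Bool) → Bool → Bool → Bool
  | [], valid_port, exc => if valid_port then true else !exc
  | (r, flag) :: rest, valid_port, exc =>
    if flag && r.contains pkt_port then pvLoopA pkt_port rest true exc
    else if !flag && r.contains pkt_port then false
    else pvLoopA pkt_port rest valid_port exc

def compare_ports_py (pkt_port : Int) (rule_ports : (List (Int × Bool)) × (List (List Int × Bool)) × Bool) : Bool :=
  match pvLookup pkt_port rule_ports.1 with
  | some v => v
  | none => pvLoopA pkt_port rule_ports.2.1 false rule_ports.2.2

-- ===== PORT B =====
def compare_ports_py_alt (pkt_port : Int) (rule_ports : (List (Int × Bool)) × (List (List Int × Bool)) × Bool) : Bool :=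
  match pvLookup pkt_port rule_ports.1 with
  | some v => v
  | none =>
    if rule_ports.2.1.any (fun rf => !rf.2 && rf.1.contains pkt_port) then false
    else if rule_ports.2.1.any (fun rf => rf.2 && rf.1.contains pkt_port) then true
    else !rule_ports.2.2

-- ===== PRECONDITION & SPEC =====
def Spec_compare_ports_py (pkt_port : Int) (rule_ports : (List (Int × Bool)) × (List (List Int × Bool)) × Bool) (out : Bool) : Prop := out = compare_ports_py_alt pkt_port rule_ports
instance (pkt_port : Int) (rule_ports : (List (Int × Bool)) × (List (List Int × Bool)) × Bool) (out : Bool) : Decidable (Spec_compare_ports_py pkt_port rule_ports out) := by unfold Spec_compare_ports_py; infer_instance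

-- ===== CLAIM (what is proved, stated in full; the proofs are below) =====
def Claim_equal_compare_ports_py : Prop := ∀ (pkt_port : Int) (rule_ports : (List (Int × Bool)) × (List (List Int × Bool)) × Bool), Dom_compare_ports_py pkt_port rule_ports → Spec_compare_ports_py pkt_port rule_ports (compare_ports_py pkt_port rule_ports)

-- ===== LEMMAS AND PROOFS =====
theorem pvLoopA_eq (pkt_port : Int) (l : List (List Int × Bool)) (valid_port exc : Bool) :
    pvLoopA pkt_port l valid_port exc =
      (if l.any (fun rf => !rf.2 && rf.1.contains pkt_port) then false
       else if valid_port || l.any (fun rf => rf.2 && rf.1.contains pkt_port) then true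
       else !exc) := by
  induction l generalizing valid_port with
  | nil => cases valid_port <;> simp [pvLoopA]
  | cons hd tl ih =>
    obtain ⟨r, flag⟩ := hd
    simp only [pvLoopA, List.any_cons]
    cases flag <;> by_cases h : pkt_port ∈ r <;>
      simp [h, ih] <;> cases valid_port <;> simp

-- ===== VERDICT (by name: the statement is the Claim_ definition above) =====
theorem compare_ports_py_spec : Claim_equal_compare_ports_py := by
  intro pkt_port rule_ports _
  unfold Spec_compare_ports_py compare_ports_py compare_ports_py_alt
  cases pvLookup pkt_port rule_ports.1 with
  | some v => rfl
  | none => simp [pvLoopA_eq]
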